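-- pv_equiv track=rewrite | github.com/oakachach/budget_app | budget.py | getLongestCategoryName
-- ===== SOURCE A (Python) =====
-- def getLongestCategoryName(_categoryList) :
--   maxLength = 0
--   longestName = ""
--   for category in _categoryList :
--     if len(category["name"]) > maxLength :
--       maxLength = len(category["name"])
--       longestName = category["name"]
--     else :
--       continue
--
--   return longestName
-- ===== SOURCE B (Python) =====
-- def getLongestCategoryName(_categoryList):
--     ordered = sorted(_categoryList, key=lambda c: len(c["name"]), reverse=True)
--     return ordered[0]["name"] if ordered else ""
-- ===== Notes on version B (the rewrite author's own statement) =====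
-- stated objective: idiomatic
-- what changed: Replaces the manual max-tracking loop with a stable sort by name length descending and taking the first element (empty list -> ""); sort stability reproduces A's first-maximum tie-breaking.
-- outside the precondition, e.g. on getLongestCategoryName([{'x': 'y'}]): A raises KeyError, B raises KeyError
import Mathlib
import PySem

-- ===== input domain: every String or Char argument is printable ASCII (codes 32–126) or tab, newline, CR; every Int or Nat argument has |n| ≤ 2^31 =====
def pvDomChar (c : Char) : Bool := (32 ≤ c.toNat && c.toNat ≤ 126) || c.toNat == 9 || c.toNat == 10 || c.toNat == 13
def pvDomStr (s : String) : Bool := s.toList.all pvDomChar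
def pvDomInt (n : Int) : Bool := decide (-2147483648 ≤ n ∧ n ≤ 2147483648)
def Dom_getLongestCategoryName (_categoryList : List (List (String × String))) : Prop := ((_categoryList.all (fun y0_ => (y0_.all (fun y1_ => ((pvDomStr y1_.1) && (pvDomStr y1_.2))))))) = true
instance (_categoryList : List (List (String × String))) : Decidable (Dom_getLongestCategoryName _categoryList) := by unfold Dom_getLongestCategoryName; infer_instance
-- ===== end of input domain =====

-- B replaces A's manual running-max loop with a stable sort by name length (descending) and taking the head: idiomatic, not faster.

-- shared helper: category["name"]; the KeyError case (no "name" key) is excluded by Pre_, where this getD default is never used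
def pvNameOf (c : List (String × String)) : String := ((PySem.Dict.mk c).get? "name").getD ""

-- ===== PORT A =====
def getLongestCategoryName (_categoryList : List (List (String × String))) : String :=
  (_categoryList.foldl
    (fun (st : Int × String) category =>
      if PySem.Str.len (pvNameOf category) > st.1 then
        (PySem.Str.len (pvNameOf category), pvNameOf category)
      else st)
    (0, "")).2

-- ===== PORT B =====
def getLongestCategoryName_alt (_categoryList : List (List (String × String))) : String :=
  match PySem.List.sorted _categoryList (fun c => PySem.Str.len (pvNameOf c)) true with
  | [] => ""
  | h :: _ => pvNameOf h

-- ===== PRECONDITION & SPEC =====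
-- Pre_ excludes exactly the inputs where some category has no "name" key: there Python A raises KeyError.
def Pre_getLongestCategoryName (_categoryList : List (List (String × String))) : Prop :=
  ∀ c ∈ _categoryList, ((PySem.Dict.mk c).get? "name").isSome = true
instance (_categoryList : List (List (String × String))) : Decidable (Pre_getLongestCategoryName _categoryList) := by unfold Pre_getLongestCategoryName; infer_instance

def pvWitness_getLongestCategoryName : (List (List (String × String))) := [[("name", "Food")], [("name", "Clothing")]]

def Spec_getLongestCategoryName (_categoryList : List (List (String × String))) (out : String) : Prop := out = getLongestCategoryName_alt _categoryList
instance (_categoryList : List (List (String × String))) (out : String) : Decidable (Spec_getLongestCategoryName _categoryList out) := by unfold Spec_getLongestCategoryName; infer_instance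

-- ===== CLAIM (what is proved, stated in full; the proofs are below) =====
def Claim_equal_getLongestCategoryName : Prop := ∀ (_categoryList : List (List (String × String))), Dom_getLongestCategoryName _categoryList → Pre_getLongestCategoryName _categoryList → Spec_getLongestCategoryName _categoryList (getLongestCategoryName _categoryList)

-- ===== LEMMAS AND PROOFS =====

-- The invariant tying A's running (maxLength, longestName) accumulator to the head of B's
-- insertion-sorted accumulator.
def pvInv (s : List (List (String × String))) (st : Int × String) : Prop :=
  match s with
  | [] => st = (0, "")
  | h :: _ => st = (PySem.Str.len (pvNameOf h), pvNameOf h)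

lemma pvName_empty_of_len_zero (c : List (String × String))
    (h : PySem.Str.len (pvNameOf c) = 0) : pvNameOf c = "" := by
  rw [PySem.Str.len_eq] at h
  have h0 : (pvNameOf c).toList = [] := by
    have := List.length_eq_zero_iff.mp (by exact_mod_cast h)
    exact this
  exact String.toList_eq_nil_iff.mp h0

lemma pvLen_nonneg (c : List (String × String)) : 0 ≤ PySem.Str.len (pvNameOf c) := by
  rw [PySem.Str.len_eq]; exact_mod_cast Nat.zero_le _

lemma pvStep (s : List (List (String × String))) (st : Int × String) (x : List (String × String))
    (hInv : pvInv s st) :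
    pvInv (PySem.List.insertBy (fun a b => decide ((fun c => PySem.Str.len (pvNameOf c)) b < (fun c => PySem.Str.len (pvNameOf c)) a)) x s)
      (if PySem.Str.len (pvNameOf x) > st.1 then (PySem.Str.len (pvNameOf x), pvNameOf x) else st) := by
  cases s with
  | nil =>
    simp only [pvInv] at hInv
    subst hInv
    simp only [PySem.List.insertBy, pvInv]
    by_cases h : PySem.Str.len (pvNameOf x) > 0
    · rw [if_pos h]
    · rw [if_neg h]
      have hz : PySem.Str.len (pvNameOf x) = 0 := le_antisymm (by omega) (pvLen_nonneg x)
      rw [hz, pvName_empty_of_len_zero x hz]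
  | cons h t =>
    simp only [pvInv] at hInv
    subst hInv
    simp only [PySem.List.insertBy]
    by_cases hlt : PySem.Str.len (pvNameOf h) < PySem.Str.len (pvNameOf x)
    · have h2 : (pvNameOf h).length < (pvNameOf x).length := by
        rw [PySem.Str.len_eq, PySem.Str.len_eq] at hlt; exact_mod_cast hlt
      simp [pvInv, h2]
    · have h2 : ¬ (pvNameOf h).length < (pvNameOf x).length := by
        rw [PySem.Str.len_eq, PySem.Str.len_eq] at hlt; exact_mod_cast hlt
      simp [pvInv, h2]

lemma pvFold_inv (xs : List (List (String × String))) (s : List (List (String × String))) (st : Int × String)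
    (hInv : pvInv s st) :
    pvInv (xs.foldl (fun acc x => PySem.List.insertBy (fun a b => decide ((fun c => PySem.Str.len (pvNameOf c)) b < (fun c => PySem.Str.len (pvNameOf c)) a)) x acc) s)
      (xs.foldl (fun st x => if PySem.Str.len (pvNameOf x) > st.1 then (PySem.Str.len (pvNameOf x), pvNameOf x) else st) st) := by
  induction xs generalizing s st with
  | nil => exact hInv
  | cons x xs ih => exact ih _ _ (pvStep s st x hInv)

-- ===== VERDICT (by name: the statement is the Claim_ definition above) =====
theorem getLongestCategoryName_spec : Claim_equal_getLongestCategoryName := by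
  intro xs _ _
  unfold Spec_getLongestCategoryName getLongestCategoryName getLongestCategoryName_alt
  rw [PySem.List.sorted_rev_eq_foldl_insertBy]
  have h := pvFold_inv xs [] (0, "") rfl
  revert h
  cases hs : xs.foldl (fun acc x => PySem.List.insertBy (fun a b => decide ((fun c => PySem.Str.len (pvNameOf c)) b < (fun c => PySem.Str.len (pvNameOf c)) a)) x acc) [] with
  | nil => intro h; simp only [pvInv] at h; rw [h]
  | cons hd tl => intro h; simp only [pvInv] at h; rw [h]
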